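-- pv_equiv track=rewrite | github.com/Avalanche-io/c4py | src/c4py/naturalsort.py | _segment_string
-- ===== SOURCE A (Python) =====
-- def _segment_string(s: str) -> list[tuple[str, bool, int]]:
--     """Split a string into alternating text/numeric segments.
--
--     Returns a list of (text, is_numeric, num_value) tuples.
--     For text segments, num_value is 0 (unused).
--     """
--     if not s:
--         return []
--
--     segments: list[tuple[str, bool, int]] = []
--     current: list[str] = []
--     is_numeric = s[0].isdigit()
--
--     for ch in s:
--         is_digit = ch.isdigit()
--         if is_digit != is_numeric:
--             # Transition: flush current segment
--             text = "".join(current)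
--             num_value = _parse_number(text) if is_numeric else 0
--             segments.append((text, is_numeric, num_value))
--             current = [ch]
--             is_numeric = is_digit
--         else:
--             current.append(ch)
--
--     # Final segment
--     if current:
--         text = "".join(current)
--         num_value = _parse_number(text) if is_numeric else 0
--         segments.append((text, is_numeric, num_value))
--
--     return segments
--
-- def _parse_number(s: str) -> int:
--     """Convert a numeric string to int."""
--     result = 0
--     for ch in s:
--         if "0" <= ch <= "9":
--             result = result * 10 + (ord(ch) - ord("0"))
--     return result
-- ===== SOURCE B (Python) =====
-- def _segment_string(s: str) -> list[tuple[str, bool, int]]: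
--     """Split a string into alternating text/numeric segments.
--
--     Recursively peels off the maximal leading run of digits (or of
--     non-digits), emits it as one segment, and recurses on the remainder.
--     """
--     if not s:
--         return []
--     d = s[0].isdigit()
--     i = 1
--     while i < len(s) and s[i].isdigit() == d:
--         i += 1
--     head, rest = s[:i], s[i:]
--     value = 0
--     if d:
--         for ch in head:
--             value = value * 10 + (ord(ch) - 48)
--     return [(head, d, value)] + _segment_string(rest)
-- ===== Notes on version B (the rewrite author's own statement) =====
-- stated objective: alternative
-- what changed: Replaces A's single-pass accumulator with transition tracking and a separate final flush by a recursive decomposition that peels off the maximal leading run and recurses on the remainder (trades A's single pass for clearer recursive structure); the numeric value is a plain decimal accumulation over the all-digit run with no per-character guard.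
import Mathlib
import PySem

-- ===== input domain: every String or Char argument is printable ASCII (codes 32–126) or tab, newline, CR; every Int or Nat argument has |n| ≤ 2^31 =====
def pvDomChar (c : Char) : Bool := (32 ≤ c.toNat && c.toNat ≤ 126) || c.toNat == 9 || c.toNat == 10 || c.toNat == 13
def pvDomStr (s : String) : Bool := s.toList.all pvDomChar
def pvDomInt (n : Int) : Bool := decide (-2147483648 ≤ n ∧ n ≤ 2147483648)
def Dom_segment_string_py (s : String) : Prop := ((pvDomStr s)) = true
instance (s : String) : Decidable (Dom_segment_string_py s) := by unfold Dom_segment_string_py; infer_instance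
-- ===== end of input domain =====

-- B replaces A's transition-tracking accumulator + final flush by recursion that peels the
-- maximal leading run; same values everywhere (objective: an alternative decomposition, not speed).

-- ch.isdigit() for a single char; exact on Dom's ASCII domain (tab/newline/CR are not digits)
def pvIsDigit (c : Char) : Bool := decide ('0' ≤ c ∧ c ≤ '9')

-- ===== PORT A =====
-- _parse_number: guarded decimal accumulation over the string
def parseNumber (l : List Char) : Int :=
  l.foldl (fun r c => if '0' ≤ c ∧ c ≤ '9' then r * 10 + ((c.toNat : Int) - 48) else r) 0

-- the for-loop of A: state (segments, current, is_numeric)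
def segLoop : List Char → List (String × Bool × Int) → List Char → Bool →
    List (String × Bool × Int) × List Char × Bool
  | [], segs, cur, isnum => (segs, cur, isnum)
  | ch :: rest, segs, cur, isnum =>
    let d := pvIsDigit ch
    if d ≠ isnum then
      segLoop rest (segs ++ [(String.ofList cur, isnum, if isnum then parseNumber cur else 0)]) [ch] d
    else
      segLoop rest segs (cur ++ [ch]) isnum

-- the final "if current: flush" of A
def segFinish : List (String × Bool × Int) × List Char × Bool → List (String × Bool × Int)
  | (segs, cur, isnum) =>
    if cur ≠ [] then segs ++ [(String.ofList cur, isnum, if isnum then parseNumber cur else 0)]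
    else segs

def segment_string_py (s : String) : List (String × Bool × Int) :=
  match s.toList with
  | [] => []
  | c :: t => segFinish (segLoop (c :: t) [] [] (pvIsDigit c))

-- ===== PORT B =====
-- B's while loop: split t into its maximal prefix whose digit-ness equals d, and the rest
def spanRun (d : Bool) : List Char → List Char × List Char
  | [] => ([], [])
  | c :: t =>
    if pvIsDigit c = d then
      let p := spanRun d t
      (c :: p.1, p.2)
    else ([], c :: t)

-- B's value loop: plain decimal accumulation (head is all digits when used)
def decVal (l : List Char) : Int :=
  l.foldl (fun v c => v * 10 + ((c.toNat : Int) - 48)) 0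

theorem spanRun_snd_le (d : Bool) : ∀ t : List Char, (spanRun d t).2.length ≤ t.length := by
  intro t
  induction t with
  | nil => simp [spanRun]
  | cons c t ih =>
    simp only [spanRun]
    split
    · simpa using Nat.le_succ_of_le ih
    · simp

def segGo : List Char → List (String × Bool × Int)
  | [] => []
  | c :: t =>
    let d := pvIsDigit c
    let p := spanRun d t
    (String.ofList (c :: p.1), d, if d then decVal (c :: p.1) else 0) :: segGo p.2
termination_by l => l.length
decreasing_by
  have := spanRun_snd_le (pvIsDigit c) t
  simpa using Nat.lt_succ_of_le this

def segment_string_py_alt (s : String) : List (String × Bool × Int) :=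
  segGo s.toList

-- ===== PRECONDITION & SPEC =====
def Spec_segment_string_py (s : String) (out : List (String × Bool × Int)) : Prop :=
  out = segment_string_py_alt s
instance (s : String) (out : List (String × Bool × Int)) : Decidable (Spec_segment_string_py s out) := by
  unfold Spec_segment_string_py; infer_instance

-- ===== CLAIM (what is proved, stated in full; the proofs are below) =====
def Claim_equal_segment_string_py : Prop :=
  ∀ (s : String), Dom_segment_string_py s → Spec_segment_string_py s (segment_string_py s)

-- ===== LEMMAS AND PROOFS =====

theorem spanRun_all (d : Bool) (l : List Char) (h : ∀ c ∈ l, pvIsDigit c = d) :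
    spanRun d l = (l, []) := by
  induction l with
  | nil => simp [spanRun]
  | cons c t ih =>
    simp [spanRun, h c (by simp), ih (fun x hx => h x (by simp [hx]))]

theorem spanRun_stop (d : Bool) (xs : List Char) (c : Char) (t : List Char)
    (hxs : ∀ x ∈ xs, pvIsDigit x = d) (hc : pvIsDigit c ≠ d) :
    spanRun d (xs ++ c :: t) = (xs, c :: t) := by
  induction xs with
  | nil => simp [spanRun, hc]
  | cons y ys ih =>
    simp [List.cons_append, spanRun, hxs y (by simp), ih (fun x hx => hxs x (by simp [hx]))]

theorem parseNumber_eq_decVal (l : List Char) (h : ∀ c ∈ l, pvIsDigit c = true) :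
    parseNumber l = decVal l := by
  have aux : ∀ (l : List Char), (∀ c ∈ l, pvIsDigit c = true) → ∀ a : Int,
      l.foldl (fun r c => if '0' ≤ c ∧ c ≤ '9' then r * 10 + ((c.toNat : Int) - 48) else r) a =
      l.foldl (fun v c => v * 10 + ((c.toNat : Int) - 48)) a := by
    intro l hl
    induction l with
    | nil => intro a; rfl
    | cons c t ih =>
      intro a
      have hc : '0' ≤ c ∧ c ≤ '9' := by
        have := hl c (by simp); simpa [pvIsDigit] using this
      simp only [List.foldl_cons, if_pos hc]
      exact ih (fun x hx => hl x (by simp [hx])) _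
  exact aux l h 0

-- head segment of segGo on a list beginning with a nonempty run of kind d
theorem segGo_run (d : Bool) (c : Char) (t l : List Char)
    (hc : pvIsDigit c = d) (ht : ∀ x ∈ t, pvIsDigit x = d)
    (hl : l = [] ∨ ∃ c' t', l = c' :: t' ∧ pvIsDigit c' ≠ d) :
    segGo (c :: t ++ l) =
      (String.ofList (c :: t), d, if d then decVal (c :: t) else 0) :: segGo l := by
  have hspan : spanRun d (t ++ l) = (t, l) := by
    rcases hl with rfl | ⟨c', t', rfl, hne⟩
    · rw [List.append_nil]; exact spanRun_all d t ht
    · exact spanRun_stop d t c' t' ht hne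
  simp only [List.cons_append, segGo, hc, hspan]

-- main invariant: running A's loop from a nonempty current run equals segs ++ B on cur ++ l
theorem segLoop_eq_segGo (l : List Char) :
    ∀ (segs : List (String × Bool × Int)) (cur : List Char) (d : Bool),
      cur ≠ [] → (∀ x ∈ cur, pvIsDigit x = d) →
      segFinish (segLoop l segs cur d) = segs ++ segGo (cur ++ l) := by
  induction l with
  | nil =>
    intro segs cur d hne hall
    obtain ⟨c, t, rfl⟩ := List.exists_cons_of_ne_nil hne
    have hrun := segGo_run d c t [] (hall c (by simp))
      (fun x hx => hall x (by simp [hx])) (Or.inl rfl)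
    simp only [List.append_nil] at hrun ⊢
    rw [hrun]
    simp only [segLoop, segFinish, if_pos (by simp : (c :: t) ≠ [])]
    by_cases hd : d
    · simp [hd, parseNumber_eq_decVal (c :: t) (fun x hx => by rw [hall x hx, hd]), segGo]
    · simp at hd; simp [hd, segGo]
  | cons ch rest ih =>
    intro segs cur d hne hall
    simp only [segLoop]
    by_cases hch : pvIsDigit ch = d
    · rw [if_neg (by simp [hch])]
      have := ih segs (cur ++ [ch]) d (by simp)
        (by intro x hx; rcases List.mem_append.1 hx with h | h
            · exact hall x h
            · simp at h; simp [h, hch])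
      rw [this, List.append_assoc]
      simp
    · rw [if_pos (by simp [hch])]
      obtain ⟨c, t, rfl⟩ := List.exists_cons_of_ne_nil hne
      have hrun := segGo_run d c t (ch :: rest) (hall c (by simp))
        (fun x hx => hall x (by simp [hx])) (Or.inr ⟨ch, rest, rfl, hch⟩)
      rw [ih _ [ch] (pvIsDigit ch) (by simp) (by simp)]
      rw [List.cons_append, hrun]
      by_cases hd : d
      · simp [hd, parseNumber_eq_decVal (c :: t) (fun x hx => by rw [hall x hx, hd])]
      · simp at hd; simp [hd]

-- ===== VERDICT (by name: the statement is the Claim_ definition above) =====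
theorem segment_string_py_spec : Claim_equal_segment_string_py := by
  unfold Claim_equal_segment_string_py
  intro s _
  unfold Spec_segment_string_py segment_string_py segment_string_py_alt
  cases h : s.toList with
  | nil => simp [segGo]
  | cons c t =>
    show segFinish (segLoop (c :: t) [] [] (pvIsDigit c)) = segGo (c :: t)
    have h1 : segLoop (c :: t) [] [] (pvIsDigit c) = segLoop t [] [c] (pvIsDigit c) := by
      simp [segLoop]
    rw [h1]
    have := segLoop_eq_segGo t [] [c] (pvIsDigit c) (by simp) (by simp)
    simpa using this
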